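-- pv_equiv track=rewrite | github.com/arxaqapi/segma | src/segma/utils/receptive_fields.py | rf_start_i
-- ===== SOURCE A (Python) =====
-- from math import prod
--
-- def rf_start_i(
--     u_L: int,
--     strides: list[int] | tuple[int, ...],
--     paddings: list[int] | tuple[int, ...],
-- ) -> int:
--     """Computes the start index of the receptive field.
--
--     see eq (5) in https://distill.pub/2019/computing-receptive-fields/
--
--     Args:
--         u_L (int): start index of the output range.
--         strides (list[int]): list of stride sizes, from first to last convolutionnal layer.
--         paddings (list[int]): list of padding values (size of the right and left padding), from first to last convolutionnal layer.
--         L (int): number of layers to take into account.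
--
--     Returns:
--         int: Start index of the receptive field in the input vector. Can be negative.
--     """
--     L = len(strides)
--     assert L == len(paddings)
--     S_0 = prod(strides)
--
--     P_0 = 0
--     for layer_i in range(L):
--         P_0 += paddings[layer_i] * prod(strides[:layer_i])
--
--     return u_L * S_0 - P_0
-- ===== SOURCE B (Python) =====
-- def rf_start_i(
--     u_L: int,
--     strides: list[int] | tuple[int, ...],
--     paddings: list[int] | tuple[int, ...],
-- ) -> int:
--     """Computes the start index of the receptive field (Horner recurrence)."""
--     assert len(strides) == len(paddings)
--     acc = u_L
--     for i in reversed(range(len(strides))):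
--         acc = acc * strides[i] - paddings[i]
--     return acc
-- ===== Notes on version B (the rewrite author's own statement) =====
-- stated objective: simpler
-- what changed: Replaces the total product S_0 plus a prefix-product weighted sum P_0 by a single Horner-style accumulator run over the layers in reverse, removing all prefix products.
import Mathlib
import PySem

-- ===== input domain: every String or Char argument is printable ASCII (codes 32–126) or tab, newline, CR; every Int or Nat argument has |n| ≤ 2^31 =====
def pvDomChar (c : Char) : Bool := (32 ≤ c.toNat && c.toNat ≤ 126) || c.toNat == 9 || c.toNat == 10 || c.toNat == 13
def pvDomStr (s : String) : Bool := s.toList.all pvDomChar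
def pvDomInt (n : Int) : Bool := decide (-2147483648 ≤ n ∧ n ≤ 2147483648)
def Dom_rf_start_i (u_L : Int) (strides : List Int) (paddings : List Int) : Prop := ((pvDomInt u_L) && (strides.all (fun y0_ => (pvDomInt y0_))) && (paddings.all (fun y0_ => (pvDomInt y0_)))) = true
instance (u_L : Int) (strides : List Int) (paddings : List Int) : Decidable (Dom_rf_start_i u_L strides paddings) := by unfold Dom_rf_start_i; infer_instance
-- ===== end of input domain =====

-- B replaces A's total product S_0 and prefix-product weighted sum P_0 by one
-- Horner-style accumulator run over the layers in reverse (simpler, one pass).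

-- ===== PORT A =====
-- Literal port of A: S_0 = prod(strides); P_0 accumulated over range(L) with
-- paddings[layer_i] * prod(strides[:layer_i]). Indices of the for-loop are the
-- nonnegative 0..L-1, so `getD i 0` / `take i` are exact for the in-range access
-- paddings[layer_i] and the slice strides[:layer_i] (Pre_ gives len equality).
def rf_start_i (u_L : Int) (strides : List Int) (paddings : List Int) : Int :=
  let L := strides.length
  let S_0 := strides.foldl (· * ·) 1
  let P_0 := (List.range L).foldl
    (fun acc layer_i => acc + paddings.getD layer_i 0 * ((strides.take layer_i).foldl (· * ·) 1)) 0
  u_L * S_0 - P_0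

-- ===== PORT B =====
-- Literal port of Source B: acc = u_L; for i in reversed(range(len(strides))): acc = acc*strides[i] - paddings[i]
def rf_start_i_alt (u_L : Int) (strides : List Int) (paddings : List Int) : Int :=
  (List.range strides.length).reverse.foldl
    (fun acc i => acc * strides.getD i 0 - paddings.getD i 0) u_L

-- ===== PRECONDITION & SPEC =====
-- Pre_: A's assert requires len(strides) == len(paddings); A raises AssertionError otherwise.
def Pre_rf_start_i (u_L : Int) (strides : List Int) (paddings : List Int) : Prop :=
  strides.length = paddings.length
instance (u_L : Int) (strides : List Int) (paddings : List Int) : Decidable (Pre_rf_start_i u_L strides paddings) := by unfold Pre_rf_start_i; infer_instance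
def pvWitness_rf_start_i : Int × List Int × List Int := (3, [2, 2], [1, 0])

def Spec_rf_start_i (u_L : Int) (strides : List Int) (paddings : List Int) (out : Int) : Prop := out = rf_start_i_alt u_L strides paddings
instance (u_L : Int) (strides : List Int) (paddings : List Int) (out : Int) : Decidable (Spec_rf_start_i u_L strides paddings out) := by unfold Spec_rf_start_i; infer_instance

-- ===== CLAIM (what is proved, stated in full; the proofs are below) =====
def Claim_equal_rf_start_i : Prop := ∀ (u_L : Int) (strides : List Int) (paddings : List Int), Dom_rf_start_i u_L strides paddings → Pre_rf_start_i u_L strides paddings → Spec_rf_start_i u_L strides paddings (rf_start_i u_L strides paddings)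

-- ===== LEMMAS AND PROOFS =====

theorem pv_foldl_mul_one (l : List Int) : l.foldl (· * ·) 1 = l.prod := by
  simpa using (List.prod_eq_foldl (l := l)).symm

theorem pv_foldl_add_gen (l : List Nat) (h : Nat → Int) (b : Int) :
    l.foldl (fun acc i => acc + h i) b = b + (l.map h).sum := by
  induction l generalizing b with
  | nil => simp
  | cons a t ih => simp [List.foldl_cons, ih, add_assoc]

theorem pv_foldl_add_map (l : List Nat) (h : Nat → Int) :
    l.foldl (fun acc i => acc + h i) 0 = (l.map h).sum := by
  simpa using pv_foldl_add_gen l h 0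

theorem pv_main (s p : List Int) (u : Int) (hl : s.length = p.length) :
    u * s.prod - ((List.range s.length).map
        (fun i => p.getD i 0 * (s.take i).prod)).sum
      = (List.range s.length).foldr (fun i acc => acc * s.getD i 0 - p.getD i 0) u := by
  induction s generalizing p u with
  | nil => simp
  | cons a s' ih =>
      cases p with
      | nil => simp at hl
      | cons b p' =>
          have hl' : s'.length = p'.length := by simpa using hl
          simp only [List.length_cons, List.range_succ_eq_map, List.map_cons, List.map_map,
            List.sum_cons, List.foldr_cons, List.foldr_map, Function.comp_def,
            List.getD_cons_succ, List.getD_cons_zero, List.take_succ_cons, List.take_zero,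
            List.prod_cons, List.prod_nil]
          have hfn : (fun i => p'.getD i 0 * (a * (s'.take i).prod))
              = fun i => a * (p'.getD i 0 * (s'.take i).prod) := by
            funext i; ring
          rw [hfn, List.sum_map_mul_left]
          have hs : (List.map (fun i => p'.getD i 0 * (s'.take i).prod) (List.range s'.length)).sum
              = u * s'.prod
                - (List.range s'.length).foldr (fun i acc => acc * s'.getD i 0 - p'.getD i 0) u := by
            linarith [ih p' u hl']
          rw [hs]
          ring

-- ===== VERDICT (by name: the statement is the Claim_ definition above) =====
theorem rf_start_i_spec : Claim_equal_rf_start_i := by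
  intro u s p _ hpre
  unfold Spec_rf_start_i rf_start_i rf_start_i_alt
  simp only [List.foldl_reverse, pv_foldl_mul_one]
  rw [pv_foldl_add_map (List.range s.length) (fun i => p.getD i 0 * (s.take i).prod)]
  exact pv_main s p u hpre
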